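-- pv_equiv track=rewrite | github.com/rlee32/election-fraud-missouri | plot_turnout_by_age.py | organize_by_age
-- ===== SOURCE A (Python) =====
-- from typing import Dict, List
--
-- def organize_by_age(voters: List[any]) -> Dict[int, List[any]]:
--     ages = {}
--     for v in voters:
--         a = v['age']
--         if a not in ages:
--             ages[a] = []
--         ages[a].append(v)
--     return ages
-- ===== SOURCE B (Python) =====
-- def organize_by_age(voters):
--     # Two-pass: distinct ages in first-appearance order, then one filter pass per age.
--     distinct = list(dict.fromkeys(v['age'] for v in voters))
--     return {a: [v for v in voters if v['age'] == a] for a in distinct}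
-- ===== Notes on version B (the rewrite author's own statement) =====
-- stated objective: alternative
-- what changed: Replaces the single-pass dict accumulation (create-empty-then-append per voter) with a two-pass scheme: dedup the ages in first-appearance order, then build each group by filtering the voter list.
import Mathlib
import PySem

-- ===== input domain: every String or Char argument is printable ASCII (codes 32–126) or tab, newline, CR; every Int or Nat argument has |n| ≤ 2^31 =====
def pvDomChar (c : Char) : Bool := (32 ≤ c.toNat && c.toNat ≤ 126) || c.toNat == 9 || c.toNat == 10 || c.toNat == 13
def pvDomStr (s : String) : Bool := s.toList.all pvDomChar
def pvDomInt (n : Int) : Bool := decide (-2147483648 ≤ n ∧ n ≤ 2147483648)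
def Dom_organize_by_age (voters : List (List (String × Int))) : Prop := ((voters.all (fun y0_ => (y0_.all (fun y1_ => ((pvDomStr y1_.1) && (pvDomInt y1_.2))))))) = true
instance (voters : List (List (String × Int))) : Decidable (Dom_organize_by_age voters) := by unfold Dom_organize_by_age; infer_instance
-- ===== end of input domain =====

-- B replaces A's single-pass dict accumulation by a two-pass dedup-then-filter scheme
-- (objective: alternative decomposition, same result).

-- v['age'] on a voter dict (a 'raise' is excluded by Pre_, so the .getD 0 default is never the value used)
def pvAge (v : List (String × Int)) : Int := ((PySem.Dict.mk v).get? "age").getD 0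

-- ===== PORT A =====
def organize_by_age (voters : List (List (String × Int))) : List (Int × List (List (String × Int))) :=
  (voters.foldl
    (fun ages v =>
      let a := pvAge v
      let ages := if ages.contains a then ages else ages.insert a ([] : List (List (String × Int)))
      -- ages[a].append(v): a is present here, so this is modify with default []
      ages.modify a [] (· ++ [v]))
    PySem.Dict.empty).items

-- ===== PORT B =====
def organize_by_age_alt (voters : List (List (String × Int))) : List (Int × List (List (String × Int))) :=
  (PySem.List.dedup (voters.map pvAge)).map
    (fun a => (a, voters.filter (fun v => pvAge v == a)))

-- ===== PRECONDITION & SPEC =====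
-- Pre_ excludes voters missing the 'age' key, on which A raises KeyError.
def Pre_organize_by_age (voters : List (List (String × Int))) : Prop :=
  voters.all (fun v => (PySem.Dict.mk v).contains "age") = true
instance (voters : List (List (String × Int))) : Decidable (Pre_organize_by_age voters) := by unfold Pre_organize_by_age; infer_instance
def pvWitness_organize_by_age : (List (List (String × Int))) := [[("age", 30), ("id", 1)], [("age", 25)], [("age", 30)]]

def Spec_organize_by_age (voters : List (List (String × Int))) (out : List (Int × List (List (String × Int)))) : Prop := out = organize_by_age_alt voters
instance (voters : List (List (String × Int))) (out : List (Int × List (List (String × Int)))) : Decidable (Spec_organize_by_age voters out) := by unfold Spec_organize_by_age; infer_instance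

-- ===== CLAIM (what is proved, stated in full; the proofs are below) =====
def Claim_equal_organize_by_age : Prop := ∀ (voters : List (List (String × Int))), Dom_organize_by_age voters → Pre_organize_by_age voters → Spec_organize_by_age voters (organize_by_age voters)

-- ===== LEMMAS AND PROOFS =====

-- A's loop body ('if a not in ages: ages[a] = []' then append) is one modify with default [].
theorem pv_step_eq (d : PySem.Dict Int (List (List (String × Int)))) (a : Int)
    (f : List (List (String × Int)) → List (List (String × Int))) :
    (if d.contains a then d else d.insert a []).modify a [] f = d.modify a [] f := by
  by_cases h : d.contains a = true
  · simp [h]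
  · have hc : d.contains a = false := by simpa using h
    simp [hc, PySem.Dict.modify, PySem.Dict.getD_insert_self,
      PySem.Dict.insert_insert_self, PySem.Dict.getD_of_not_contains]

theorem organize_by_age_spec : Claim_equal_organize_by_age := by
  intro voters _ _
  unfold Spec_organize_by_age organize_by_age organize_by_age_alt
  have hstep : (voters.foldl
      (fun ages v =>
        let a := pvAge v
        let ages := if ages.contains a then ages else ages.insert a ([] : List (List (String × Int)))
        ages.modify a [] (· ++ [v]))
      PySem.Dict.empty)
      = voters.foldl (fun d v => d.modify (pvAge v) [] (· ++ [v])) PySem.Dict.empty := by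
    have hfun : (fun (ages : PySem.Dict Int (List (List (String × Int)))) v =>
        let a := pvAge v
        let ages := if ages.contains a then ages else ages.insert a ([] : List (List (String × Int)))
        ages.modify a [] (· ++ [v]))
        = (fun d v => d.modify (pvAge v) [] (· ++ [v])) := by
      funext d v
      exact pv_step_eq d (pvAge v) (· ++ [v])
    rw [hfun]
  rw [hstep]
  set F := voters.foldl (fun d v => d.modify (pvAge v) [] (· ++ [v])) PySem.Dict.empty with hF
  have hnd : F.keys.Nodup := by
    rw [hF]
    exact PySem.Dict.nodup_keys_foldl_modify_key voters pvAge []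
      (fun d v => (· ++ [v])) PySem.Dict.empty (by simp)
  have hkeys : F.keys = PySem.List.dedup (voters.map pvAge) := by
    rw [hF, PySem.Dict.keys_foldl_modify_key]
    simp [PySem.Set.update, PySem.Set.ofList, PySem.Dict.keys_empty]
  have hgetD : ∀ c, F.getD c [] = voters.filter (fun v => pvAge v == c) := by
    intro c
    have hm : F = (voters.map (fun v => (pvAge v, v))).foldl
        (fun d p => d.modify p.1 [] (· ++ [p.2])) PySem.Dict.empty := by
      rw [hF, List.foldl_map]
    rw [hm, PySem.Dict.getD_foldl_modify_append, PySem.Dict.getD_empty]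
    simp [List.filter_map, Function.comp_def]
  rw [PySem.Dict.items_eq_map_keys F hnd [], hkeys]
  exact List.map_congr_left (fun k _ => by rw [hgetD k])
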